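-- pv_equiv track=rewrite | github.com/oAzv/GCFM | scripts/utils.py | make_8bit
-- ===== SOURCE A (Python) =====
-- def make_8bit(pair: str, ss: str):
--     '''The fusion secondary structure transforms the four-bit nucleotide sequence into the eight-bit. (Actually five and nine bit)
--
--     The four-bit nucleotide sequence is converted into an eight-bit sequence according to whether the corresponding position matches.
--
--     Args:
--
--         pair: Nucleotide sequence.
--
--         ss: Secondary structure sequence.
--
--     Returns:
--
--         str: A transformed eight-bit nucleotide sequence.
--     '''
--     j = 0
--     for i in range(len(ss)):
--         if ss[i] == '.':
--             while pair[i + j] == '-':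
--                 j += 1
--             pair = pair[:i + j] + pair[i + j].lower() + pair[i + j + 1:]
--         else:
--             while pair[i + j] == '-':
--                 j += 1
--     return pair
-- ===== SOURCE B (Python) =====
-- def make_8bit(pair: str, ss: str):
--     positions = [i for i, c in enumerate(pair) if c != '-']
--     chars = list(pair)
--     for k, c in enumerate(ss):
--         idx = positions[k]
--         if c == '.':
--             chars[idx] = chars[idx].lower()
--     return ''.join(chars)
-- ===== Notes on version B (the rewrite author's own statement) =====
-- stated objective: alternative
-- what changed: A's single fused walk that skips gaps with a running offset and rebuilds the string by slicing at every '.' is replaced by a two-pass decomposition: first build the index table of non-gap positions, then one pass over ss lowercases into a mutable char list via that table.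
-- outside the precondition, e.g. on make_8bit('A-', '..'): A raises IndexError, B raises IndexError
import Mathlib
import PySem

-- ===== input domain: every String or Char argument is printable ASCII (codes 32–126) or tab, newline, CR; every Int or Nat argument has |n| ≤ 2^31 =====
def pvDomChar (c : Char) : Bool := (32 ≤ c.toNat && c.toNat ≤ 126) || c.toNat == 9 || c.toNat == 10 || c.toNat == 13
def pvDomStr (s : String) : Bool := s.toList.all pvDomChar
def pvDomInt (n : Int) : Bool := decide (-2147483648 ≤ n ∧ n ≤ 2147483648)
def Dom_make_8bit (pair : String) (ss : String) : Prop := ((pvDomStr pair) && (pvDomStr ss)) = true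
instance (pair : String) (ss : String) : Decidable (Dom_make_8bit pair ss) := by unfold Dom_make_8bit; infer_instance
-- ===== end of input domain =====

-- B replaces A's fused gap-skipping walk (which rebuilds the string by slicing at each '.')
-- by a two-pass decomposition: first an index table of the non-gap positions, then one pass
-- over ss that lowercases into a char array; objective: alternative (same asymptotic cost).


-- ===== PORT A =====
-- inner loop "while pair[i + j] == '-': j += 1": returns the first non-gap index ≥ k together
-- with its character; none = IndexError (pair[i+j] out of range), exact
def pvSkipA (p : List Char) (k : Nat) : Option (Nat × Char) :=
  if hk : k < p.length then
    if p[k] = '-' then pvSkipA p (k + 1) else some (k, p[k])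
  else none
termination_by p.length - k

-- the "for i in range(len(ss))" loop; state: current pair p, i, j; none = IndexError
def pvLoopA (p : List Char) (ssl : List Char) (i j : Nat) : Option (List Char) :=
  match ssl with
  | [] => some p
  | c :: rest =>
    if c = '.' then
      match pvSkipA p (i + j) with
      | none => none
      | some (idx, ch) =>
          -- pair = pair[:i+j] + pair[i+j].lower() + pair[i+j+1:]
          pvLoopA (p.take idx ++ [PySem.Chars.lowerChar ch] ++ p.drop (idx + 1)) rest (i + 1) (idx - i)
    else
      match pvSkipA p (i + j) with
      | none => none
      | some (idx, _) => pvLoopA p rest (i + 1) (idx - i)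

def make_8bit (pair : String) (ss : String) : String :=
  String.ofList ((pvLoopA pair.toList ss.toList 0 0).getD pair.toList)

-- ===== PORT B =====
-- positions = [i for i, c in enumerate(pair) if c != '-']
def pvPositions (p : List Char) (s : Int) : List Int :=
  ((PySem.List.enumerate p s).filter (fun ic => ic.2 != '-')).map (·.1)

-- for k, c in enumerate(ss): idx = positions[k]; if c == '.': chars[idx] = chars[idx].lower()
-- none = IndexError on positions[k] (or chars[idx], which never fires for valid positions)
def pvApplyB (positions : List Int) (chars : List Char) (kcs : List (Int × Char)) : Option (List Char) :=
  match kcs with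
  | [] => some chars
  | (k, c) :: rest =>
    match PySem.List.pyGet? positions k with
    | none => none
    | some idx =>
      if c = '.' then
        match PySem.List.pyGet? chars idx with
        | none => none
        | some ch => pvApplyB positions (PySem.List.pySetD chars idx (PySem.Chars.lowerChar ch)) rest
      else
        pvApplyB positions chars rest

def make_8bit_alt (pair : String) (ss : String) : String :=
  String.ofList ((pvApplyB (pvPositions pair.toList 0) pair.toList
      (PySem.List.enumerate ss.toList 0)).getD pair.toList)

-- ===== PRECONDITION & SPEC =====
-- Pre_ excludes exactly the inputs on which A raises IndexError: ss longer than the number of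
-- non-gap characters of pair (B raises IndexError there too, at the same step).
def Pre_make_8bit (pair : String) (ss : String) : Prop :=
  ss.toList.length ≤ (pair.toList.filter (fun c => c != '-')).length
instance (pair : String) (ss : String) : Decidable (Pre_make_8bit pair ss) := by
  unfold Pre_make_8bit; infer_instance

def pvWitness_make_8bit : String × String := ("A-CG", "...")

def Spec_make_8bit (pair : String) (ss : String) (out : String) : Prop := out = make_8bit_alt pair ss
instance (pair : String) (ss : String) (out : String) : Decidable (Spec_make_8bit pair ss out) := by unfold Spec_make_8bit; infer_instance

-- ===== CLAIM (what is proved, stated in full; the proofs are below) =====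
def Claim_equal_make_8bit : Prop := ∀ (pair : String) (ss : String), Dom_make_8bit pair ss → Pre_make_8bit pair ss → Spec_make_8bit pair ss (make_8bit pair ss)

-- ===== LEMMAS AND PROOFS =====

-- number of non-gap characters
def pvCnt (q : List Char) : Nat := (q.filter (fun c => c != '-')).length

theorem pvLower_ne_dash (c : Char) (h : c ≠ '-') : PySem.Chars.lowerChar c ≠ '-' := by
  unfold PySem.Chars.lowerChar
  split
  · rename_i hu
    have h1 : 'A' ≤ c ∧ c ≤ 'Z' := by simpa [PySem.Chars.isupper] using hu
    have h2 : 65 ≤ c.toNat ∧ c.toNat ≤ 90 := by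
      obtain ⟨a, b⟩ := h1
      rw [Char.le_def] at a b
      exact ⟨a, b⟩
    intro he
    have h3 : (Char.ofNat (c.toNat + 32)).toNat = ('-').toNat := by rw [he]
    rw [Char.toNat_ofNat] at h3
    have hv : (c.toNat + 32).isValidChar := by left; omega
    rw [if_pos hv] at h3
    have : ('-').toNat = 45 := by decide
    omega
  · exact h

theorem pvPositions_cons (c : Char) (t : List Char) (s : Int) :
    pvPositions (c :: t) s =
      if c = '-' then pvPositions t (s + 1) else s :: pvPositions t (s + 1) := by
  simp only [pvPositions, PySem.List.enumerate_cons, List.filter_cons]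
  by_cases h : c = '-' <;> simp [h]

theorem pvPositions_append (a b : List Char) (s : Int) :
    pvPositions (a ++ b) s = pvPositions a s ++ pvPositions b (s + a.length) := by
  simp [pvPositions, PySem.List.enumerate_append, List.filter_append]

theorem pvPositions_length (a : List Char) (s : Int) :
    (pvPositions a s).length = pvCnt a := by
  induction a generalizing s with
  | nil => rfl
  | cons c t ih =>
    rw [pvPositions_cons]
    by_cases h : c = '-'
    · rw [if_pos h, ih]
      simp [pvCnt, h]
    · rw [if_neg h]
      simp only [List.length_cons, ih]
      simp [pvCnt, h]

theorem pvCnt_take_succ (p : List Char) (m : Nat) (hm : m < p.length) :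
    pvCnt (p.take (m + 1)) = pvCnt (p.take m) + (if p[m] = '-' then 0 else 1) := by
  unfold pvCnt
  rw [List.take_succ_eq_append_getElem hm, List.filter_append, List.length_append]
  by_cases hc : p[m] = '-' <;> simp [hc]

-- facts delivered by a successful inner while-loop
theorem pvSkipA_spec (p : List Char) (m : Nat) : ∀ (idx : Nat) (ch : Char),
    pvSkipA p m = some (idx, ch) →
    m ≤ idx ∧ idx < p.length ∧ p[idx]? = some ch ∧ ch ≠ '-' ∧
      pvCnt (p.take idx) = pvCnt (p.take m) := by
  induction m using pvSkipA.induct (p := p) with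
  | case1 m hm hdash ih =>
    intro idx ch h
    rw [pvSkipA, dif_pos hm, if_pos hdash] at h
    obtain ⟨h1, h2, h3, h4, h5⟩ := ih idx ch h
    refine ⟨by omega, h2, h3, h4, ?_⟩
    rw [h5, pvCnt_take_succ p m hm, if_pos hdash]
    omega
  | case2 m hm hdash =>
    intro idx ch h
    rw [pvSkipA, dif_pos hm, if_neg hdash] at h
    obtain ⟨rfl, rfl⟩ : m = idx ∧ p[m] = ch := by
      constructor
      · exact congrArg Prod.fst (Option.some.inj h)
      · exact congrArg Prod.snd (Option.some.inj h)
    exact ⟨le_refl _, hm, List.getElem?_eq_getElem hm, hdash, rfl⟩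
  | case3 m hm =>
    intro idx ch h
    rw [pvSkipA, dif_neg hm] at h
    exact absurd h (by simp)

-- the i-th entry of the position table is exactly what the inner while-loop finds
theorem pvPositions_lookup (p : List Char) (m : Nat) : ∀ (i : Nat), m ≤ p.length →
    pvCnt (p.take m) = i →
    (pvPositions p 0)[i]? = (pvSkipA p m).map (fun x => ((x.1 : Nat) : Int)) := by
  induction m using pvSkipA.induct (p := p) with
  | case1 m hm hdash ih =>
    intro i _ hc
    have hc1 : pvCnt (p.take (m + 1)) = i := by
      rw [pvCnt_take_succ p m hm, if_pos hdash, hc]; omega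
    rw [pvSkipA, dif_pos hm, if_pos hdash]
    exact ih i (by omega) hc1
  | case2 m hm hdash =>
    intro i _ hc
    rw [pvSkipA, dif_pos hm, if_neg hdash, Option.map_some]
    -- decompose p at position m
    have hsplit : p = p.take m ++ p[m] :: p.drop (m + 1) := by
      conv_lhs => rw [← List.take_append_drop m p, List.drop_eq_getElem_cons hm]
    have hlt : (p.take m).length = m := List.length_take_of_le (by omega)
    conv_lhs => rw [hsplit]
    rw [pvPositions_append, pvPositions_cons]
    simp only [if_neg hdash]
    rw [List.getElem?_append_right (by rw [pvPositions_length, hc]),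
        pvPositions_length, hc]
    simp [hlt]
  | case3 m hm =>
    intro i hmle hc
    have hme : m = p.length := by omega
    rw [pvSkipA, dif_neg hm]
    have : p.take m = p := List.take_of_length_le (by omega)
    rw [this] at hc
    apply List.getElem?_eq_none
    rw [pvPositions_length, hc]

-- lowercasing a non-gap character does not move the position table
theorem pvPositions_set (p : List Char) (n : Nat) (v : Char) (hn : n < p.length)
    (hc : p[n] ≠ '-') (hv : v ≠ '-') :
    pvPositions (p.set n v) 0 = pvPositions p 0 := by
  rw [List.set_eq_take_cons_drop v hn]
  conv_rhs => rw [← List.take_append_drop n p, List.drop_eq_getElem_cons hn]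
  rw [pvPositions_append, pvPositions_cons, pvPositions_append, pvPositions_cons]
  simp [hc, hv]

theorem pvMain (ssl : List Char) (p : List Char) (i j : Nat)
    (hle : i + j ≤ p.length) (hcnt : pvCnt (p.take (i + j)) = i) :
    pvLoopA p ssl i j = pvApplyB (pvPositions p 0) p (PySem.List.enumerate ssl (i : Int)) := by
  induction ssl generalizing p i j with
  | nil => rfl
  | cons c rest ih =>
    rw [PySem.List.enumerate_cons]
    have hpos := pvPositions_lookup p (i + j) i hle hcnt
    cases hsk : pvSkipA p (i + j) with
    | none =>
      rw [hsk] at hpos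
      simp only [pvLoopA, pvApplyB, PySem.List.pyGet?_natCast, hpos, Option.map_none]
      split <;> rw [hsk]
    | some v =>
      obtain ⟨idx, ch⟩ := v
      obtain ⟨hmi, hlt, hget, hch, hcc⟩ := pvSkipA_spec p (i + j) idx ch hsk
      rw [hsk] at hpos
      have hii : i ≤ idx := by omega
      have harith : (i + 1) + (idx - i) = idx + 1 := by omega
      have hgetE : p[idx] = ch := by
        have := List.getElem?_eq_getElem hlt
        rw [this] at hget
        exact Option.some.inj hget
      have hcnt' : pvCnt (p.take (idx + 1)) = i + 1 := by
        rw [pvCnt_take_succ p idx hlt, hgetE, if_neg hch, hcc, hcnt]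
      have hcast : ((i : Int) + 1) = (((i + 1 : Nat)) : Int) := by push_cast; ring
      simp only [pvLoopA, pvApplyB, PySem.List.pyGet?_natCast, hpos, Option.map_some, hsk]
      by_cases hc : c = '.'
      · simp only [if_pos hc, hget, PySem.List.pySetD_natCast]
        have hset : p.set idx (PySem.Chars.lowerChar ch) =
            p.take idx ++ [PySem.Chars.lowerChar ch] ++ p.drop (idx + 1) := by
          rw [List.set_eq_take_cons_drop _ hlt]; simp
        have hppres : pvPositions (p.set idx (PySem.Chars.lowerChar ch)) 0 = pvPositions p 0 := by
          apply pvPositions_set p idx _ hlt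
          · rw [hgetE]; exact hch
          · exact pvLower_ne_dash ch hch
        rw [← hset, ← hppres, hcast]
        apply ih
        · rw [harith, List.length_set]; omega
        · rw [harith]
          have htk : (p.set idx (PySem.Chars.lowerChar ch)).take (idx + 1) =
              p.take idx ++ [PySem.Chars.lowerChar ch] := by
            rw [hset]
            have h1 : (p.take idx).length = idx := List.length_take_of_le (by omega)
            rw [List.append_assoc, ← h1, List.take_append]
            simp [h1]
          rw [htk]
          have h2 : pvCnt (p.take idx ++ [PySem.Chars.lowerChar ch]) =
              pvCnt (p.take idx) + 1 := by
            simp [pvCnt, List.filter_append, pvLower_ne_dash ch hch]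
          rw [h2, hcc, hcnt]
      · simp only [if_neg hc, hcast]
        apply ih
        · omega
        · rw [harith]; exact hcnt'

-- ===== VERDICT (by name: the statement is the Claim_ definition above) =====
theorem make_8bit_spec : Claim_equal_make_8bit := by
  intro pair ss _ _
  unfold Spec_make_8bit make_8bit make_8bit_alt
  have h := pvMain ss.toList pair.toList 0 0 (by simp) (by simp [pvCnt])
  norm_num at h
  rw [h]
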